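-- pv_equiv track=rewrite | github.com/quan2007a/Assigment_Tec | assig_4/Assigment_4/uppercase.py | check_course
-- ===== SOURCE A (Python) =====
-- def check_course(code):
--
--     if len(code) != 6:
--         return False
--
--     # check first 3 characters (A-Z)
--     for i in range(0, 3):
--         if code[i] < 'A' or code[i] > 'Z':
--             return False
--
--     # check last 3 characters (0-9)
--     for i in range(3, 6):
--         if code[i] < '0' or code[i] > '9':
--             return False
--
--     return True
-- ===== SOURCE B (Python) =====
-- import re
--
-- _COURSE_RE = re.compile(r'[A-Z]{3}[0-9]{3}')
--
-- def check_course(code):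
--     return _COURSE_RE.fullmatch(code) is not None
-- ===== Notes on version B (the rewrite author's own statement) =====
-- stated objective: idiomatic
-- what changed: Replaces the explicit length check and two index-range loops with a single precompiled anchored regex fullmatch of [A-Z]{3}[0-9]{3} coerced to bool.
import Mathlib
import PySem

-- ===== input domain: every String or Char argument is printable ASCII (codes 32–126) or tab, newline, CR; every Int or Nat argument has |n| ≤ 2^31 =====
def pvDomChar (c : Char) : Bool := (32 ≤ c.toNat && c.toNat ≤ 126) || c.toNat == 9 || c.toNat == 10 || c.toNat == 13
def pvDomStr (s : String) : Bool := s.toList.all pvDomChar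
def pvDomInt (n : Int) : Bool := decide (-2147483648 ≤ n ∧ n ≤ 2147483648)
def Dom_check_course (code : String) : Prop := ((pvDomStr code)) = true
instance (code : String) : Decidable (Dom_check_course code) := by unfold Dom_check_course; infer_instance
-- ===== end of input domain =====

-- B replaces A's length check and two index loops with one anchored regex fullmatch (idiomatic, same cost).

-- ===== PORT A =====
-- the early-return 'for i in range(a,b)' loops become 'any' over pyRange (true = some iteration returned False)
def check_course (code : String) : Bool :=
  if PySem.Str.len code ≠ 6 then false
  else if (PySem.List.pyRange 0 3 1).any (fun i =>
      match PySem.Str.pyGet? code i with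
      | some c => decide (c < 'A') || decide ('Z' < c)
      | none => false) then false
  else if (PySem.List.pyRange 3 6 1).any (fun i =>
      match PySem.Str.pyGet? code i with
      | some c => decide (c < '0') || decide ('9' < c)
      | none => false) then false
  else true

-- ===== PORT B =====
-- hand port of re.fullmatch(r'[A-Z]{3}[0-9]{3}', code) is not None: the fixed-width anchored
-- pattern matches exactly the six-character strings whose first three chars are in [A-Z] and
-- last three in [0-9]; exact for this regex on all strings (the classes are pure ASCII ranges).
def check_course_alt (code : String) : Bool :=
  match code.toList with
  | [a, b, c, d, e, f] =>
      ('A' ≤ a && a ≤ 'Z') && ('A' ≤ b && b ≤ 'Z') && ('A' ≤ c && c ≤ 'Z') &&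
      ('0' ≤ d && d ≤ '9') && ('0' ≤ e && e ≤ '9') && ('0' ≤ f && f ≤ '9')
  | _ => false

-- ===== PRECONDITION & SPEC =====
def Spec_check_course (code : String) (out : Bool) : Prop := out = check_course_alt code
instance (code : String) (out : Bool) : Decidable (Spec_check_course code out) := by unfold Spec_check_course; infer_instance

-- ===== CLAIM (what is proved, stated in full; the proofs are below) =====
def Claim_equal_check_course : Prop := ∀ (code : String), Dom_check_course code → Spec_check_course code (check_course code)

-- ===== LEMMAS AND PROOFS =====

theorem check_course_eq_alt (code : String) :
    check_course code = check_course_alt code := by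
  unfold check_course check_course_alt
  rw [PySem.Str.len_eq]
  have h03 : PySem.List.pyRange 0 3 1 = [0, 1, 2] := by decide
  have h36 : PySem.List.pyRange 3 6 1 = [3, 4, 5] := by decide
  rw [h03, h36]
  rcases hcs : code.toList with _ | ⟨a, _ | ⟨b, _ | ⟨c, _ | ⟨d, _ | ⟨e, _ | ⟨f, _ | ⟨g, t⟩⟩⟩⟩⟩⟩⟩ <;>
    simp [PySem.Str.pyGet?, hcs, PySem.Chars.pyGet?, PySem.List.pyGet?, PySem.List.pyIdx?,
          Char.lt_def, Char.le_def]
  · -- six-character case: pure arithmetic over the char codes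
    rw [Bool.eq_iff_iff]
    simp only [Bool.and_eq_true, Bool.not_eq_true', decide_eq_true_eq, decide_eq_false_iff_not,
               UInt32.not_lt]
    tauto
  · -- length ≥ 7: the length hypothesis is impossible
    intro h
    exact absurd h (by omega)

-- ===== VERDICT (by name: the statement is the Claim_ definition above) =====
theorem check_course_spec : Claim_equal_check_course := by
  intro code _
  unfold Spec_check_course
  exact check_course_eq_alt code
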